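-- pv_equiv track=rewrite | github.com/plx30080-ctrl/LeadGen | backend/app/services/content_generator.py | _parse_email_response
-- ===== SOURCE A (Python) =====
-- from typing import Dict
--
-- def _parse_email_response(content: str) -> Dict[str, str]:
--     """Parse AI-generated email into subject and body"""
--     lines = content.strip().split('\n')
--
--     subject = ""
--     body_lines = []
--     in_body = False
--
--     for line in lines:
--         if line.startswith("SUBJECT:"):
--             subject = line.replace("SUBJECT:", "").strip()
--         elif line.startswith("BODY:"):
--             in_body = True
--         elif in_body:
--             body_lines.append(line)
--
--     body = '\n'.join(body_lines).strip()
--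
--     # Fallback if parsing failed
--     if not subject:
--         subject = "Following up on your hiring needs"
--     if not body:
--         body = content
--
--     return {
--         "subject": subject,
--         "body": body
--     }
-- ===== SOURCE B (Python) =====
-- def _parse_email_response(content: str) -> dict:
--     lines = content.strip().split('\n')
--     body_idx = next((i for i, l in enumerate(lines) if l.startswith("BODY:")), None)
--     subject_lines = [l for l in lines if l.startswith("SUBJECT:")]
--     subject = subject_lines[-1].replace("SUBJECT:", "").strip() if subject_lines else ""
--     if body_idx is None:
--         body = ""
--     else:
--         body = '\n'.join(l for l in lines[body_idx + 1:]
--                          if not l.startswith("SUBJECT:") and not l.startswith("BODY:")).strip()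
--     if not subject:
--         subject = "Following up on your hiring needs"
--     if not body:
--         body = content
--     return {"subject": subject, "body": body}
-- ===== Notes on version B (the rewrite author's own statement) =====
-- stated objective: alternative
-- what changed: Replaces A's stateful three-accumulator scan (subject, body_lines, in_body flag) with a direct decomposition: subject is the last SUBJECT:-prefixed line, body is the filtered lines after the first BODY: marker found via findIdx/next.
import Mathlib
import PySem

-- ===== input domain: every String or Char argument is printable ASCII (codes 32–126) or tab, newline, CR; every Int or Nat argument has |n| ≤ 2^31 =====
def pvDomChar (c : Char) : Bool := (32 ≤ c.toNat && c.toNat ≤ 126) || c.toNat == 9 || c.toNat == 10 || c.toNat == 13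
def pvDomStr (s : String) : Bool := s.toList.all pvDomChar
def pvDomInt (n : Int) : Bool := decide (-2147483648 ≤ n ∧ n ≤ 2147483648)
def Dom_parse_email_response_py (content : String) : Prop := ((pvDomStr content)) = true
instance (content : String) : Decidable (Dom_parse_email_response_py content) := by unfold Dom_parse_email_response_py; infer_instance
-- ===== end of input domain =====

-- B replaces A's three-state scan with a direct decomposition (last SUBJECT line; body = filtered
-- lines after the first BODY marker); same cost, no stateful loop ("alternative").

-- ===== PORT A =====
-- shared helpers naming the three tests/transform both Pythons perform
def pvIsSubj (l : String) : Bool := PySem.Str.startswith l "SUBJECT:"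
def pvIsBody (l : String) : Bool := PySem.Str.startswith l "BODY:"
def pvRepl (l : String) : String := PySem.Str.strip (PySem.Str.replace l "SUBJECT:" "")
-- content.strip().split('\n'): sep "\n" is non-empty, so split? is always some (getD never fires)
def pvLines (content : String) : List String :=
  (PySem.Str.split? (PySem.Str.strip content) "\n").getD []

-- state = (subject, body_lines, in_body), exactly A's loop body
def pvStepA (st : String × List String × Bool) (line : String) : String × List String × Bool :=
  if pvIsSubj line then (pvRepl line, st.2.1, st.2.2)
  else if pvIsBody line then (st.1, st.2.1, true)
  else if st.2.2 then (st.1, st.2.1 ++ [line], st.2.2)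
  else st

def parse_email_response_py (content : String) : List (String × String) :=
  let r := (pvLines content).foldl pvStepA ("", [], false)
  let subject := r.1
  let body := PySem.Str.strip (PySem.Str.join "\n" r.2.1)
  let subject := if subject = "" then "Following up on your hiring needs" else subject
  let body := if body = "" then content else body
  [("subject", subject), ("body", body)]

-- ===== PORT B =====
def parse_email_response_py_alt (content : String) : List (String × String) :=
  let lines := pvLines content
  let subject :=
    match (lines.filter pvIsSubj).getLast? with
    | some l => pvRepl l
    | none => ""
  let body :=
    match lines.findIdx? pvIsBody with
    | none => ""
    | some i => PySem.Str.strip (PySem.Str.join "\n"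
        ((lines.drop (i + 1)).filter (fun l => !pvIsSubj l && !pvIsBody l)))
  let subject := if subject = "" then "Following up on your hiring needs" else subject
  let body := if body = "" then content else body
  [("subject", subject), ("body", body)]

-- ===== PRECONDITION & SPEC =====
def Spec_parse_email_response_py (content : String) (out : List (String × String)) : Prop := out = parse_email_response_py_alt content
instance (content : String) (out : List (String × String)) : Decidable (Spec_parse_email_response_py content out) := by unfold Spec_parse_email_response_py; infer_instance

-- ===== CLAIM (what is proved, stated in full; the proofs are below) =====
def Claim_equal_parse_email_response_py : Prop := ∀ (content : String), Dom_parse_email_response_py content → Spec_parse_email_response_py content (parse_email_response_py content)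

-- ===== LEMMAS AND PROOFS =====

theorem pvStepA_subj {line : String} (st : String × List String × Bool)
    (hs : pvIsSubj line = true) : pvStepA st line = (pvRepl line, st.2.1, st.2.2) := by
  simp [pvStepA, hs]

theorem pvStepA_body {line : String} (st : String × List String × Bool)
    (hs : pvIsSubj line = false) (hb : pvIsBody line = true) :
    pvStepA st line = (st.1, st.2.1, true) := by
  simp [pvStepA, hs, hb]

theorem pvStepA_plain_true {line : String} (s : String) (bl : List String)
    (hs : pvIsSubj line = false) (hb : pvIsBody line = false) :
    pvStepA (s, bl, true) line = (s, bl ++ [line], true) := by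
  simp [pvStepA, hs, hb]

theorem pvStepA_plain_false {line : String} (s : String) (bl : List String)
    (hs : pvIsSubj line = false) (hb : pvIsBody line = false) :
    pvStepA (s, bl, false) line = (s, bl, false) := by
  simp [pvStepA, hs, hb]

-- a line cannot start with both "SUBJECT:" and "BODY:"
theorem pvSubj_not_body (l : String) (h : pvIsSubj l = true) : pvIsBody l = false := by
  unfold pvIsSubj at h
  unfold pvIsBody
  rw [Bool.eq_false_iff]
  intro hb
  simp only [PySem.Str.startswith_eq, PySem.Chars.startswith_iff] at h hb
  obtain ⟨t1, ht1⟩ := h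
  obtain ⟨t2, ht2⟩ := hb
  rw [← ht1] at ht2
  have hS : "SUBJECT:".toList = ['S','U','B','J','E','C','T',':'] := rfl
  have hB : "BODY:".toList = ['B','O','D','Y',':'] := rfl
  rw [hS, hB] at ht2
  simp at ht2

-- A's fold, subject component: last SUBJECT line wins, else the incoming value
theorem pvFold_subj (lines : List String) (s0 : String) (bl : List String) (ib : Bool) :
    (lines.foldl pvStepA (s0, bl, ib)).1 =
      match (lines.filter pvIsSubj).getLast? with
      | some l => pvRepl l
      | none => s0 := by
  induction lines generalizing s0 bl ib with
  | nil => rfl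
  | cons a t ih =>
    rw [List.foldl_cons]
    by_cases hs : pvIsSubj a = true
    · rw [pvStepA_subj _ hs, ih]
      rw [List.filter_cons_of_pos hs, List.getLast?_cons]
      cases (t.filter pvIsSubj).getLast? <;> simp
    · rw [Bool.not_eq_true] at hs
      rw [List.filter_cons_of_neg (by simp [hs])]
      by_cases hb : pvIsBody a = true
      · rw [pvStepA_body _ hs hb, ih]
      · rw [Bool.not_eq_true] at hb
        cases ib
        · rw [pvStepA_plain_false _ _ hs hb, ih]
        · rw [pvStepA_plain_true _ _ hs hb, ih]

-- A's fold with in_body = true: appends every non-marker line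
theorem pvFold_body_true (lines : List String) (s0 : String) (bl : List String) :
    (lines.foldl pvStepA (s0, bl, true)).2.1 =
      bl ++ lines.filter (fun l => !pvIsSubj l && !pvIsBody l) := by
  induction lines generalizing s0 bl with
  | nil => simp
  | cons a t ih =>
    rw [List.foldl_cons]
    by_cases hs : pvIsSubj a = true
    · rw [pvStepA_subj _ hs, ih]
      simp [hs]
    · rw [Bool.not_eq_true] at hs
      by_cases hb : pvIsBody a = true
      · rw [pvStepA_body _ hs hb, ih]
        simp [hs, hb]
      · rw [Bool.not_eq_true] at hb
        rw [pvStepA_plain_true _ _ hs hb, ih]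
        simp [hs, hb]

-- A's fold with in_body = false: body lines are the filtered lines after the first BODY marker
theorem pvFold_body_false (lines : List String) (s0 : String) (bl : List String) :
    (lines.foldl pvStepA (s0, bl, false)).2.1 =
      bl ++ (match lines.findIdx? pvIsBody with
             | none => []
             | some i => (lines.drop (i + 1)).filter (fun l => !pvIsSubj l && !pvIsBody l)) := by
  induction lines generalizing s0 bl with
  | nil => simp
  | cons a t ih =>
    rw [List.foldl_cons]
    by_cases hb : pvIsBody a = true
    · have hs : pvIsSubj a = false := by
        rw [Bool.eq_false_iff]; intro h; rw [pvSubj_not_body a h] at hb; exact Bool.false_ne_true hb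
      rw [pvStepA_body _ hs hb, pvFold_body_true]
      simp [List.findIdx?_cons, hb]
    · rw [Bool.not_eq_true] at hb
      by_cases hs : pvIsSubj a = true
      · rw [pvStepA_subj _ hs, ih]
        simp only [List.findIdx?_cons, hb, Bool.false_eq_true, reduceIte]
        cases t.findIdx? pvIsBody <;> simp
      · rw [Bool.not_eq_true] at hs
        rw [pvStepA_plain_false _ _ hs hb, ih]
        simp only [List.findIdx?_cons, hb, Bool.false_eq_true, reduceIte]
        cases t.findIdx? pvIsBody <;> simp

-- ===== VERDICT (by name: the statement is the Claim_ definition above) =====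
set_option maxHeartbeats 1000000 in
theorem parse_email_response_py_spec : Claim_equal_parse_email_response_py := by
  intro content _
  unfold Spec_parse_email_response_py
  simp only [parse_email_response_py, parse_email_response_py_alt]
  rw [pvFold_subj, pvFold_body_false]
  simp only [List.nil_append]
  generalize pvLines content = L
  generalize List.findIdx? pvIsBody L = fi
  cases fi with
  | none => rw [if_pos (show PySem.Str.strip (PySem.Str.join "\n" []) = "" from rfl), if_pos rfl]
  | some i => rfl
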